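-- pv_equiv track=rewrite | github.com/Danish-albanero/Python_Training | day12/day12_1.py | buddy
-- ===== SOURCE A (Python) =====
-- def buddy(a,b):
--     if len(a) != len(b):
--         return False
--     elif sorted(a) != sorted(b):
--         return False
--     else:
--         c = 0
--         for i in range(len(a)):
--             if a[i] != b[i]:
--                 c +=1
--                 if c == 3:
--                     return False
--         return True
-- ===== SOURCE B (Python) =====
-- def buddy(a, b):
--     if len(a) != len(b):
--         return False
--     diff = []
--     for x, y in zip(a, b):
--         if x != y:
--             diff.append((x, y))
--             if len(diff) > 2:
--                 return False
--     if not diff: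
--         return True
--     if len(diff) == 2:
--         (x1, y1), (x2, y2) = diff
--         return x1 == y2 and x2 == y1
--     return False
-- ===== Notes on version B (the rewrite author's own statement) =====
-- stated objective: faster
-- what changed: Instead of sorting both lists and then counting mismatches, B makes one zip pass collecting the (at most two) mismatched pairs with early exit and accepts iff there are zero mismatches or exactly two that are each other's swap; no sorting at all.
import Mathlib
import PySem

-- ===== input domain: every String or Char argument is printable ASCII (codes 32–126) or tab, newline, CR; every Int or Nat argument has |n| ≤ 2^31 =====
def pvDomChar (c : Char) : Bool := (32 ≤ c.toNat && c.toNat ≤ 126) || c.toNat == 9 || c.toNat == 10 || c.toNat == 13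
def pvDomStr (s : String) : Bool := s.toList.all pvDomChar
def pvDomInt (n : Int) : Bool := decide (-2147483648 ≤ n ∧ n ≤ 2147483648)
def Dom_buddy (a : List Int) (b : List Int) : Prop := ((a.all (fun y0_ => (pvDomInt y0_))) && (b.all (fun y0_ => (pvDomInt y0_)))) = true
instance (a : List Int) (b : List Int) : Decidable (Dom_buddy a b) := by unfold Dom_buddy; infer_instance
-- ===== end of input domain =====

-- B replaces A's sort-then-count with one zip pass collecting (at most two, early exit) mismatched
-- pairs and a swap check instead — O(n), no sorting (measured faster in a timing run).

-- ===== PORT A =====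
-- the 'for i in range(len(a))' loop with counter c and early return at c == 3
def buddyLoop (a : List Int) (b : List Int) : List Int → Int → Bool
  | [], _ => true
  | i :: is, c =>
      if (PySem.List.pyGet? a i).getD 0 ≠ (PySem.List.pyGet? b i).getD 0 then
        let c' := c + 1
        if c' = 3 then false else buddyLoop a b is c'
      else buddyLoop a b is c

def buddy (a : List Int) (b : List Int) : Bool :=
  if a.length ≠ b.length then false
  else if PySem.List.sorted a (fun x => x) false ≠ PySem.List.sorted b (fun x => x) false then false
  else buddyLoop a b (PySem.List.pyRange 0 (a.length : Int) 1) 0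

-- ===== PORT B =====
-- the 'for x, y in zip(a, b)' loop appending mismatched pairs to diff, early exit at len > 2
def altLoop : List Int → List Int → List (Int × Int) → Option (List (Int × Int))
  | x :: xs, y :: ys, diff =>
      if x ≠ y then
        let diff' := diff ++ [(x, y)]
        if diff'.length > 2 then none else altLoop xs ys diff'
      else altLoop xs ys diff
  | _, _, diff => some diff

def buddy_alt (a : List Int) (b : List Int) : Bool :=
  if a.length ≠ b.length then false
  else
    match altLoop a b [] with
    | none => false
    | some [] => true
    | some [(x1, y1), (x2, y2)] => x1 == y2 && x2 == y1
    | some _ => false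

-- ===== PRECONDITION & SPEC =====
def Spec_buddy (a : List Int) (b : List Int) (out : Bool) : Prop := out = buddy_alt a b
instance (a : List Int) (b : List Int) (out : Bool) : Decidable (Spec_buddy a b out) := by unfold Spec_buddy; infer_instance

-- ===== CLAIM (what is proved, stated in full; the proofs are below) =====
def Claim_equal_buddy : Prop := ∀ (a : List Int) (b : List Int), Dom_buddy a b → Spec_buddy a b (buddy a b)

-- ===== LEMMAS AND PROOFS =====

-- the list of mismatched position pairs
def pvDiffs (a b : List Int) : List (Int × Int) :=
  (a.zip b).filter (fun p => !(p.1 == p.2))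

-- B's loop characterised by pvDiffs
theorem altLoop_spec : ∀ (a b : List Int) (acc : List (Int × Int)), acc.length ≤ 2 →
    altLoop a b acc =
      if acc.length + (pvDiffs a b).length ≤ 2 then some (acc ++ pvDiffs a b) else none := by
  intro a
  induction a with
  | nil => intro b acc h; simp [altLoop, pvDiffs, h]
  | cons x xs ih =>
    intro b acc h
    cases b with
    | nil => simp [altLoop, pvDiffs, h]
    | cons y ys =>
      by_cases hxy : x = y
      · simp [altLoop, hxy, pvDiffs, ih ys acc h]
      · have hg : (!((x : Int) == y)) = true := by simp [hxy]
        simp only [altLoop, if_pos hxy, pvDiffs, List.zip_cons_cons, List.filter_cons, hg,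
          if_pos]
        have hlap : (acc ++ [(x, y)]).length = acc.length + 1 := by simp
        by_cases h2 : (acc ++ [(x, y)]).length > 2
        · have : ¬ (acc.length + ((x, y) :: ((xs.zip ys).filter (fun p => !(p.1 == p.2)))).length ≤ 2) := by
            simp only [List.length_cons]; omega
          rw [if_pos h2, if_neg this]
        · have hle : (acc ++ [(x, y)]).length ≤ 2 := by omega
          rw [if_neg h2, ih ys (acc ++ [(x, y)]) hle]
          rw [show pvDiffs xs ys = (xs.zip ys).filter (fun p => !(p.1 == p.2)) from rfl, hlap]
          split_ifs with h3 h4 h4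
          · simp
          · simp only [List.length_cons] at h4; omega
          · simp only [List.length_cons] at h4; omega
          · rfl

-- every pair in pvDiffs has distinct components
theorem pvDiffs_ne {a b : List Int} {p : Int × Int} (hp : p ∈ pvDiffs a b) : p.1 ≠ p.2 := by
  have := List.of_mem_filter hp
  simpa using this

-- no mismatches + equal lengths ⇒ equal lists
theorem eq_of_diffs_nil : ∀ (a b : List Int), a.length = b.length → pvDiffs a b = [] → a = b := by
  intro a
  induction a with
  | nil => intro b h _; cases b <;> simp_all
  | cons x xs ih =>
    intro b h hd
    cases b with
    | nil => simp at h
    | cons y ys =>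
      by_cases hxy : x = y
      · subst hxy
        have hg : (!((x : Int) == x)) = true ↔ False := by simp
        simp only [pvDiffs, List.zip_cons_cons, List.filter_cons] at hd
        rw [if_neg (by simp)] at hd
        simp only [List.length_cons, Nat.add_left_inj] at h
        rw [ih ys h hd]
      · simp only [pvDiffs, List.zip_cons_cons, List.filter_cons] at hd
        rw [if_pos (by simp [hxy])] at hd
        simp at hd

-- bookkeeping: a ++ snds(diffs) is a permutation of b ++ fsts(diffs)
theorem perm_diffs : ∀ (a b : List Int), a.length = b.length →
    (a ++ (pvDiffs a b).map Prod.snd).Perm (b ++ (pvDiffs a b).map Prod.fst) := by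
  intro a
  induction a with
  | nil => intro b h; cases b <;> simp_all [pvDiffs]
  | cons x xs ih =>
    intro b h
    cases b with
    | nil => simp at h
    | cons y ys =>
      simp only [List.length_cons, Nat.add_left_inj] at h
      have IH := ih ys h
      by_cases hxy : x = y
      · subst hxy
        simp only [pvDiffs, List.zip_cons_cons, List.filter_cons]
        rw [if_neg (by simp)]
        exact (IH.cons x)
      · simp only [pvDiffs, List.zip_cons_cons, List.filter_cons]
        rw [if_pos (by simp [hxy])]
        simp only [List.map_cons, List.cons_append]
        exact (List.perm_middle.cons x).trans
          (((IH.cons y).cons x).trans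
            ((List.Perm.swap y x _).trans (List.perm_middle.symm.cons y)))

-- a ~ b ↔ fsts(diffs) ~ snds(diffs), given equal lengths
theorem perm_iff_diffs (a b : List Int) (h : a.length = b.length) :
    a.Perm b ↔ ((pvDiffs a b).map Prod.fst).Perm ((pvDiffs a b).map Prod.snd) := by
  have key := perm_diffs a b h
  constructor
  · intro hp
    have := ((List.perm_append_left_iff b).mp ((hp.symm.append_right _).trans key))
    exact this.symm
  · intro hp
    have : (a ++ (pvDiffs a b).map Prod.snd).Perm (b ++ (pvDiffs a b).map Prod.snd) :=
      key.trans ((List.Perm.refl b).append hp)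
    exact (List.perm_append_right_iff _).mp this

-- perm of two-element lists
theorem perm_pair_iff (x z y w : Int) :
    ([x, z] : List Int).Perm [y, w] ↔ (x = y ∧ z = w) ∨ (x = w ∧ z = y) := by
  constructor
  · intro hp
    have hx : x ∈ ([y, w] : List Int) := hp.mem_iff.mp (by simp)
    simp only [List.mem_cons, List.mem_singleton, List.not_mem_nil, or_false] at hx
    rcases hx with hx | hx
    · subst hx
      have := (List.perm_cons x).mp hp
      left; exact ⟨rfl, by simpa using this.mem_iff.mp (by simp)⟩
    · subst hx
      have hp' : ([x, z] : List Int).Perm [x, y] := hp.trans (List.Perm.swap x y [])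
      have := (List.perm_cons x).mp hp'
      right; exact ⟨rfl, by simpa using this.mem_iff.mp (by simp)⟩
  · rintro (⟨h1, h2⟩ | ⟨h1, h2⟩) <;> subst h1 <;> subst h2
    · exact List.Perm.refl _
    · exact List.Perm.swap _ _ _

-- A's loop characterised: with valid index suffix, result = (count so far + remaining diffs < 3)
theorem buddyLoop_spec : ∀ (a b : List Int), a.length = b.length →
    ∀ (k : Nat) (c : Nat), c ≤ 2 →
    buddyLoop a b (PySem.List.pyRange (k : Int) (a.length : Int) 1) (c : Int) =
      decide (c + (pvDiffs (a.drop k) (b.drop k)).length < 3) := by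
  intro a b h k
  induction hk : a.length - k generalizing k with
  | zero =>
    intro c hc
    have hk2 : (a.length : Int) ≤ (k : Int) := by exact_mod_cast Nat.le_of_sub_eq_zero hk
    rw [PySem.List.pyRange_one_eq_nil hk2]
    have ha : a.drop k = [] := List.drop_eq_nil_of_le (by omega)
    have hb : b.drop k = [] := List.drop_eq_nil_of_le (by omega)
    simp [buddyLoop, ha, hb, pvDiffs]
    omega
  | succ n ihn =>
    intro c hc
    have hklt : k < a.length := by omega
    have hkb : k < b.length := by omega
    rw [PySem.List.pyRange_one_cons (by exact_mod_cast hklt)]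
    have hga : (PySem.List.pyGet? a (k : Int)).getD 0 = a[k] := by
      rw [PySem.List.pyGet?_natCast]
      simp [List.getElem?_eq_getElem hklt]
    have hgb : (PySem.List.pyGet? b (k : Int)).getD 0 = b[k]'hkb := by
      rw [PySem.List.pyGet?_natCast]
      simp [List.getElem?_eq_getElem hkb]
    have hda : a.drop k = a[k] :: a.drop (k + 1) := List.drop_eq_getElem_cons hklt
    have hdb : b.drop k = (b[k]'hkb) :: b.drop (k + 1) := List.drop_eq_getElem_cons hkb
    have hrec : ∀ c' : Nat, c' ≤ 2 →
        buddyLoop a b (PySem.List.pyRange ((k : Int) + 1) (a.length : Int) 1) (c' : Int) =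
          decide (c' + (pvDiffs (a.drop (k + 1)) (b.drop (k + 1))).length < 3) := by
      intro c' hc'
      have := ihn (k + 1) (by omega) c' hc'
      simpa [Nat.cast_add, Nat.cast_one] using this
    by_cases hne : a[k] = b[k]'hkb
    · rw [buddyLoop, hga, hgb, if_neg (by simpa using hne)]
      rw [hrec c hc, hda, hdb]
      simp only [pvDiffs, List.zip_cons_cons, List.filter_cons]
      rw [if_neg (by simp [hne])]
      rfl
    · rw [buddyLoop, hga, hgb, if_pos (by simpa using hne)]
      have hdcount : (pvDiffs (a.drop k) (b.drop k)).length =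
          (pvDiffs (a.drop (k + 1)) (b.drop (k + 1))).length + 1 := by
        rw [hda, hdb]
        simp only [pvDiffs, List.zip_cons_cons, List.filter_cons]
        rw [if_pos (by simp [hne])]
        rfl
      by_cases h3 : (c : Int) + 1 = 3
      · have hc3 : c = 2 := by omega
        rw [if_pos h3, hdcount]
        subst hc3
        simp
        omega
      · have hcn : c + 1 ≤ 2 := by omega
        rw [if_neg h3]
        have : (c : Int) + 1 = ((c + 1 : Nat) : Int) := by push_cast; ring
        rw [this, hrec (c + 1) hcn, hdcount]
        simp only [decide_eq_decide]
        omega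

-- ===== VERDICT (by name: the statement is the Claim_ definition above) =====
theorem buddy_spec : Claim_equal_buddy := by
  intro a b _
  unfold Spec_buddy buddy buddy_alt
  by_cases hlen : a.length = b.length
  · have hlen' : ¬ (a.length ≠ b.length) := not_not_intro hlen
    simp only [if_neg hlen']
    rw [altLoop_spec a b [] (by simp)]
    have hloop := buddyLoop_spec a b hlen 0 0 (by omega)
    simp only [List.drop_zero, Nat.cast_zero, Nat.zero_add, zero_add] at hloop
    have hperm := (PySem.List.sorted_id_eq_sorted_id_iff_perm a b).trans (perm_iff_diffs a b hlen)
    match hd : pvDiffs a b with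
    | [] =>
      have hab : a = b := eq_of_diffs_nil a b hlen hd
      subst hab
      rw [if_neg (not_not_intro rfl), hloop, hd]
      simp
    | [(x, y)] =>
      have hxy : x ≠ y := pvDiffs_ne (p := (x, y)) (by rw [hd]; simp)
      have hnp : ¬ ((pvDiffs a b).map Prod.fst).Perm ((pvDiffs a b).map Prod.snd) := by
        rw [hd]; simp only [List.map_cons, List.map_nil]
        intro hcontr
        exact hxy (by simpa using hcontr.mem_iff.mp (by simp))
      rw [if_pos (fun hs => hnp (hperm.mp hs))]
      rfl
    | [(x1, y1), (x2, y2)] =>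
      have h1 : x1 ≠ y1 := pvDiffs_ne (p := (x1, y1)) (by rw [hd]; simp)
      by_cases hsw : x1 = y2 ∧ x2 = y1
      · have hpm : ((pvDiffs a b).map Prod.fst).Perm ((pvDiffs a b).map Prod.snd) := by
          rw [hd]; simp only [List.map_cons, List.map_nil]
          exact (perm_pair_iff x1 x2 y1 y2).mpr (Or.inr ⟨hsw.1, hsw.2⟩)
        rw [if_neg (not_not_intro (hperm.mpr hpm)), hloop, hd]
        simp [hsw.1, hsw.2]
      · have hnp : ¬ ((pvDiffs a b).map Prod.fst).Perm ((pvDiffs a b).map Prod.snd) := by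
          rw [hd]; simp only [List.map_cons, List.map_nil]
          intro hcontr
          rcases (perm_pair_iff x1 x2 y1 y2).mp hcontr with ⟨ha1, _⟩ | ⟨ha1, ha2⟩
          · exact h1 ha1
          · exact hsw ⟨ha1, ha2⟩
        rw [if_pos (fun hs => hnp (hperm.mp hs))]
        rw [if_pos (show [].length + [(x1, y1), (x2, y2)].length ≤ 2 by simp)]
        by_cases hx : x1 = y2
        · have hx2 : ¬ x2 = y1 := fun hc => hsw ⟨hx, hc⟩
          simp [hx2]
        · simp [hx]
    | (p :: q :: r :: t) =>
      rw [hloop, hd]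
      simp only [List.length_cons, List.length_nil, List.nil_append]
      rw [decide_eq_false (by omega),
        if_neg (show ¬ (0 + (t.length + 1 + 1 + 1) ≤ 2) by omega)]
      split_ifs <;> rfl
  · rw [if_pos hlen, if_pos hlen]
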